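-- pv_equiv track=rewrite | github.com/HelloAIXIAOJI/CodeNothing-ghw | benchmarks/tests/loop_intensive.py | nested_loops
-- ===== SOURCE A (Python) =====
-- def nested_loops(n):
--     """嵌套循环测试"""
--     sum_val = 0
--     i = 1
--
--     while i <= n:
--         j = 1
--         while j <= n:
--             sum_val += i * j
--             j += 1
--         i += 1
--
--     return sum_val
-- ===== SOURCE B (Python) =====
-- def nested_loops(n):
--     """嵌套循环测试"""
--     if n < 0:
--         return 0
--     t = n * (n + 1) // 2
--     return t * t
-- ===== Notes on version B (the rewrite author's own statement) =====
-- stated objective: faster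
-- what changed: Replaced the O(n^2) nested while loops by the closed form (n(n+1)/2)^2 computed in O(1).
import Mathlib
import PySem

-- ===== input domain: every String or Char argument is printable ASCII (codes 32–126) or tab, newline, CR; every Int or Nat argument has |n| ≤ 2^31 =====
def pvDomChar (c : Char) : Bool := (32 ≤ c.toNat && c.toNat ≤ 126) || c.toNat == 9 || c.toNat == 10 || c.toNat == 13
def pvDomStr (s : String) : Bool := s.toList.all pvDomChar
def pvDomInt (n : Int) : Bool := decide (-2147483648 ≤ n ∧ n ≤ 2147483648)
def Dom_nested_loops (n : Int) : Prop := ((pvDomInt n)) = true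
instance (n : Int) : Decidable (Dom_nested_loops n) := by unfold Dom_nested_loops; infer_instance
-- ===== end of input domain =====

-- B replaces A's O(n^2) nested while loops with the closed form (n(n+1)/2)^2 (objective: faster).

-- ===== PORT A =====
-- inner while loop: while j <= n: sum_val += i*j; j += 1
def pvInner (n i j s : Int) : Int :=
  if j ≤ n then pvInner n i (j + 1) (s + i * j) else s
termination_by (n + 1 - j).toNat
decreasing_by omega

-- outer while loop: while i <= n: <inner loop with j = 1>; i += 1
def pvOuter (n i s : Int) : Int :=
  if i ≤ n then pvOuter n (i + 1) (pvInner n i 1 s) else s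
termination_by (n + 1 - i).toNat
decreasing_by omega

def nested_loops (n : Int) : Int := pvOuter n 1 0

-- ===== PORT B =====
def nested_loops_alt (n : Int) : Int :=
  if n < 0 then 0
  else
    let t := PySem.Int.floordiv (n * (n + 1)) 2
    t * t

-- ===== PRECONDITION & SPEC =====
def Spec_nested_loops (n : Int) (out : Int) : Prop := out = nested_loops_alt n
instance (n : Int) (out : Int) : Decidable (Spec_nested_loops n out) := by unfold Spec_nested_loops; infer_instance

-- ===== CLAIM (what is proved, stated in full; the proofs are below) =====
def Claim_equal_nested_loops : Prop := ∀ (n : Int), Dom_nested_loops n → Spec_nested_loops n (nested_loops n)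

-- ===== LEMMAS AND PROOFS =====

theorem pvInner_spec (n i : Int) : ∀ (k : Nat) (j s : Int), (n + 1 - j).toNat = k → j ≤ n + 1 →
    2 * pvInner n i j s = 2 * s + i * (n * (n + 1) - (j - 1) * j) := by
  intro k
  induction k with
  | zero =>
    intro j s hk hj
    have hj' : j = n + 1 := by omega
    rw [pvInner, if_neg (by omega)]
    subst hj'; ring
  | succ m ih =>
    intro j s hk hj
    have hjn : j ≤ n := by omega
    rw [pvInner, if_pos hjn]
    have := ih (j + 1) (s + i * j) (by omega) (by omega)
    linear_combination this

theorem pvOuter_spec (n : Int) : ∀ (k : Nat) (i s : Int), (n + 1 - i).toNat = k → 1 ≤ i → i ≤ n + 1 →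
    4 * pvOuter n i s = 4 * s + n * (n + 1) * (n * (n + 1) - (i - 1) * i) := by
  intro k
  induction k with
  | zero =>
    intro i s hk h1 hi
    have hi' : i = n + 1 := by omega
    rw [pvOuter, if_neg (by omega)]
    subst hi'; ring
  | succ m ih =>
    intro i s hk h1 hi
    have hin : i ≤ n := by omega
    rw [pvOuter, if_pos hin]
    have hInner := pvInner_spec n i ((n + 1 - 1).toNat) 1 s rfl (by omega)
    have hIH := ih (i + 1) (pvInner n i 1 s) (by omega) (by omega) (by omega)
    linear_combination hIH + 2 * hInner

-- ===== VERDICT (by name: the statement is the Claim_ definition above) =====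
theorem nested_loops_spec : Claim_equal_nested_loops := by
  intro n _
  unfold Spec_nested_loops nested_loops nested_loops_alt
  by_cases hn : n < 0
  · rw [pvOuter, if_neg (by omega), if_pos hn]
  · rw [Int.not_lt] at hn
    rw [if_neg (by omega)]
    show pvOuter n 1 0 = PySem.Int.floordiv (n * (n + 1)) 2 * PySem.Int.floordiv (n * (n + 1)) 2
    have ht : 2 * PySem.Int.floordiv (n * (n + 1)) 2 = n * (n + 1) := by
      rw [PySem.Int.floordiv_eq_ediv_of_pos (by norm_num)]
      exact Int.mul_ediv_cancel' (Int.even_mul_succ_self n).two_dvd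
    have h4 := pvOuter_spec n ((n + 1 - 1).toNat) 1 0 rfl (by omega) (by omega)
    have : 4 * pvOuter n 1 0 = 4 * (PySem.Int.floordiv (n * (n + 1)) 2 * PySem.Int.floordiv (n * (n + 1)) 2) := by
      linear_combination h4 - (n * (n + 1) + 2 * PySem.Int.floordiv (n * (n + 1)) 2) * ht
    linarith
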